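-- pv_equiv track=rewrite | github.com/preetipaul09/AJmadison | aj.py | getBrandRawName
-- ===== SOURCE A (Python) =====
-- def getBrandRawName(brand_name):
--     letters, numbers, spaces = [], [], []
--     for character in brand_name:
--         if character.isalpha():
--             letters.append(character)
--         elif character.isnumeric():
--             numbers.append(character)
--         elif character.isspace():
--             spaces.append(character)
--     if len(letters) > 0: raw_name = "".join(spaces + letters)
--     else: raw_name = "".join(spaces + numbers)
--     return raw_name
-- ===== SOURCE B (Python) =====
-- def getBrandRawName(brand_name):
--     if any(c.isalpha() for c in brand_name):
--         keep = [c for c in brand_name if c.isspace() or c.isalpha()]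
--     else:
--         keep = [c for c in brand_name if c.isspace() or c.isnumeric()]
--     return "".join(sorted(keep, key=lambda c: 0 if c.isspace() else 1))
-- ===== Notes on version B (the rewrite author's own statement) =====
-- stated objective: alternative
-- what changed: Instead of one classifying loop with three accumulator lists, B filters the kept characters (spaces plus letters, or spaces plus digits when no letter occurs) and moves the spaces to the front with a stable sort on a binary key (space=0, other=1), i.e. stable sort used as stable partition.
import Mathlib
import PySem

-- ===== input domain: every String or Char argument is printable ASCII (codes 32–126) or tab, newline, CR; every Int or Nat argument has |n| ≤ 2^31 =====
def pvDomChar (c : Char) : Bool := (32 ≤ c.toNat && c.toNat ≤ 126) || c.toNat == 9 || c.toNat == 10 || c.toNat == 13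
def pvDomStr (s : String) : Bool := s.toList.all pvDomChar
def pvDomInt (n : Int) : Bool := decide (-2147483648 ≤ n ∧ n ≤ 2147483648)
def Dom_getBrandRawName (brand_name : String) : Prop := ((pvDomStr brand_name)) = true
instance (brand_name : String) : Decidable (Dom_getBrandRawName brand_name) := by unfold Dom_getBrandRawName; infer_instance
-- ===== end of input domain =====

-- B replaces A's single classifying elif-loop by a stable sort with a binary key
-- (space -> 0, other -> 1) over the kept characters: stable sort as stable partition,
-- an alternative mechanism of similar cost.


-- ===== PORT A =====
-- isnumeric is ported as PySem.Chars.isdigit: exact on the ASCII domain, where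
-- str.isnumeric and str.isdigit coincide (both mean '0'..'9').
def getBrandRawName (brand_name : String) : String :=
  let acc := brand_name.toList.foldl
    (fun (st : List Char × List Char × List Char) character =>
      let letters := st.1
      let numbers := st.2.1
      let spaces := st.2.2
      if PySem.Chars.isalpha character then (letters ++ [character], numbers, spaces)
      else if PySem.Chars.isdigit character then (letters, numbers ++ [character], spaces)
      else if PySem.Chars.isspace character then (letters, numbers, spaces ++ [character])
      else (letters, numbers, spaces))
    ([], [], [])
  if acc.1.length > 0 then String.ofList (acc.2.2 ++ acc.1)
  else String.ofList (acc.2.2 ++ acc.2.1)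

-- ===== PORT B =====
-- Source B's sort key 'lambda c: 0 if c.isspace() else 1'
def pvKey (c : Char) : Int := if PySem.Chars.isspace c then 0 else 1

def getBrandRawName_alt (brand_name : String) : String :=
  let cs := brand_name.toList
  let keep :=
    if cs.any PySem.Chars.isalpha then
      cs.filter (fun c => PySem.Chars.isspace c || PySem.Chars.isalpha c)
    else
      cs.filter (fun c => PySem.Chars.isspace c || PySem.Chars.isdigit c)
  String.ofList (PySem.List.sorted keep pvKey)

-- ===== PRECONDITION & SPEC =====
def Spec_getBrandRawName (brand_name : String) (out : String) : Prop := out = getBrandRawName_alt brand_name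
instance (brand_name : String) (out : String) : Decidable (Spec_getBrandRawName brand_name out) := by unfold Spec_getBrandRawName; infer_instance

-- ===== CLAIM (what is proved, stated in full; the proofs are below) =====
def Claim_equal_getBrandRawName : Prop := ∀ (brand_name : String), Dom_getBrandRawName brand_name → Spec_getBrandRawName brand_name (getBrandRawName brand_name)

-- ===== LEMMAS AND PROOFS =====

theorem pv_digit_not_alpha (c : Char) (h : PySem.Chars.isdigit c = true) :
    PySem.Chars.isalpha c = false := by
  simp [PySem.Chars.isalpha, PySem.Chars.isupper, PySem.Chars.islower, PySem.Chars.isdigit,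
    Char.le_def, UInt32.le_iff_toNat_le] at *
  omega

theorem pv_space_not_alpha (c : Char) (h : PySem.Chars.isspace c = true) :
    PySem.Chars.isalpha c = false := by
  simp [PySem.Chars.isalpha, PySem.Chars.isupper, PySem.Chars.islower, PySem.Chars.isspace,
    Char.le_def, UInt32.le_iff_toNat_le] at *
  omega

theorem pv_space_not_digit (c : Char) (h : PySem.Chars.isspace c = true) :
    PySem.Chars.isdigit c = false := by
  simp [PySem.Chars.isdigit, PySem.Chars.isspace,
    Char.le_def, UInt32.le_iff_toNat_le] at *
  omega

-- A's fold partitions the string into the three filtered class lists.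
theorem pv_fold_char (l : List Char) (L N S : List Char) :
    l.foldl
      (fun (st : List Char × List Char × List Char) character =>
        let letters := st.1
        let numbers := st.2.1
        let spaces := st.2.2
        if PySem.Chars.isalpha character then (letters ++ [character], numbers, spaces)
        else if PySem.Chars.isdigit character then (letters, numbers ++ [character], spaces)
        else if PySem.Chars.isspace character then (letters, numbers, spaces ++ [character])
        else (letters, numbers, spaces))
      (L, N, S)
    = (L ++ l.filter PySem.Chars.isalpha,
       N ++ l.filter PySem.Chars.isdigit,
       S ++ l.filter PySem.Chars.isspace) := by
  induction l generalizing L N S with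
  | nil => simp
  | cons c t ih =>
    by_cases ha : PySem.Chars.isalpha c = true
    · simp [List.foldl_cons, ha, ih, List.filter_cons]
      constructor
      · by_contra h; simp at h; exact absurd (pv_digit_not_alpha c h) (by simp [ha])
      · by_contra h; simp at h; exact absurd (pv_space_not_alpha c h) (by simp [ha])
    · by_cases hd : PySem.Chars.isdigit c = true
      · simp [List.foldl_cons, ha, hd, ih, List.filter_cons]
        by_contra h; simp at h; exact absurd (pv_space_not_digit c h) (by simp [hd])
      · by_cases hs : PySem.Chars.isspace c = true
        · simp [List.foldl_cons, ha, hd, hs, ih]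
        · simp [List.foldl_cons, ha, hd, hs, ih]

-- Inserting a space into S ++ T (S all spaces, T all non-spaces) lands right after S.
theorem pv_insert_space (c : Char) (hc : PySem.Chars.isspace c = true)
    (S T : List Char) (hS : ∀ x ∈ S, PySem.Chars.isspace x = true)
    (hT : ∀ x ∈ T, PySem.Chars.isspace x = false) :
    PySem.List.insertBy (fun a b => decide (pvKey a < pvKey b)) c (S ++ T)
      = S ++ c :: T := by
  induction S with
  | nil =>
    cases T with
    | nil => rfl
    | cons y ys =>
      have hy := hT y (by simp)
      simp [PySem.List.insertBy, pvKey, hc, hy]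
  | cons s S' ih =>
    have hs := hS s (by simp)
    show PySem.List.insertBy _ c (s :: (S' ++ T)) = _
    rw [show PySem.List.insertBy (fun a b => decide (pvKey a < pvKey b)) c (s :: (S' ++ T))
        = if decide (pvKey c < pvKey s) = true then c :: s :: (S' ++ T)
          else s :: PySem.List.insertBy (fun a b => decide (pvKey a < pvKey b)) c (S' ++ T)
      from rfl]
    rw [if_neg (by simp [pvKey, hc, hs])]
    rw [ih (fun x hx => hS x (by simp [hx]))]
    simp

-- Inserting a non-space goes to the end (key 1 is never < any key).
theorem pv_insert_nonspace (c : Char) (hc : PySem.Chars.isspace c = false)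
    (l : List Char) :
    PySem.List.insertBy (fun a b => decide (pvKey a < pvKey b)) c l = l ++ [c] := by
  apply PySem.List.insertBy_of_forall_not_before
  intro y _
  simp [pvKey, hc]
  split <;> omega

-- Stable sort by the binary key = stable partition: spaces first, then the rest.
theorem pv_sorted_partition (l : List Char) :
    PySem.List.sorted l pvKey
      = l.filter PySem.Chars.isspace ++ l.filter (fun c => !PySem.Chars.isspace c) := by
  rw [PySem.List.sorted_eq_foldl_insertBy]
  suffices h : ∀ (S T : List Char), (∀ x ∈ S, PySem.Chars.isspace x = true) →
      (∀ x ∈ T, PySem.Chars.isspace x = false) →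
      l.foldl (fun acc x => PySem.List.insertBy (fun a b => decide (pvKey a < pvKey b)) x acc) (S ++ T)
        = (S ++ l.filter PySem.Chars.isspace) ++ (T ++ l.filter (fun c => !PySem.Chars.isspace c)) by
    simpa using h [] [] (by simp) (by simp)
  induction l with
  | nil => intro S T _ _; simp
  | cons c t ih =>
    intro S T hS hT
    by_cases hc : PySem.Chars.isspace c = true
    · rw [List.foldl_cons, pv_insert_space c hc S T hS hT]
      have hS' : ∀ x ∈ S ++ [c], PySem.Chars.isspace x = true := by
        intro x hx
        rcases List.mem_append.mp hx with h | h
        · exact hS x h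
        · rw [List.mem_singleton.mp h]; exact hc
      have := ih (S ++ [c]) T hS' hT
      rw [show S ++ c :: T = (S ++ [c]) ++ T by simp, this]
      simp [hc]
    · have hne : PySem.Chars.isspace c = false := by simpa using hc
      rw [List.foldl_cons, pv_insert_nonspace c hne (S ++ T)]
      have hT' : ∀ x ∈ T ++ [c], PySem.Chars.isspace x = false := by
        intro x hx
        rcases List.mem_append.mp hx with h | h
        · exact hT x h
        · rw [List.mem_singleton.mp h]; exact hne
      have := ih S (T ++ [c]) hS hT'
      rw [List.append_assoc, this]
      simp [hne]

-- Filtering the kept characters back into the classes.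
theorem pv_filter_keep_space (l : List Char) (p : Char → Bool) :
    (l.filter (fun c => PySem.Chars.isspace c || p c)).filter PySem.Chars.isspace
      = l.filter PySem.Chars.isspace := by
  induction l with
  | nil => rfl
  | cons c t ih =>
    by_cases hs : PySem.Chars.isspace c = true
    · simp [hs, ih]
    · simp only [Bool.not_eq_true] at hs
      by_cases hp : p c = true <;> simp [hs, hp, ih]

theorem pv_filter_keep_other (l : List Char) (p : Char → Bool)
    (hdisj : ∀ c, p c = true → PySem.Chars.isspace c = false) :
    (l.filter (fun c => PySem.Chars.isspace c || p c)).filter (fun c => !PySem.Chars.isspace c)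
      = l.filter p := by
  induction l with
  | nil => rfl
  | cons c t ih =>
    by_cases hs : PySem.Chars.isspace c = true
    · have hp : p c = false := by
        by_contra h
        exact absurd (hdisj c (by simpa using h)) (by simp [hs])
      simp [hs, hp, ih]
    · simp only [Bool.not_eq_true] at hs
      by_cases hp : p c = true <;> simp [hs, hp, ih]

-- ===== VERDICT (by name: the statement is the Claim_ definition above) =====
theorem getBrandRawName_spec : Claim_equal_getBrandRawName := by
  intro brand_name _
  unfold Spec_getBrandRawName getBrandRawName getBrandRawName_alt
  simp only [pv_fold_char, List.nil_append]
  have hsp_alpha : ∀ c, PySem.Chars.isalpha c = true → PySem.Chars.isspace c = false := by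
    intro c hc
    by_contra h
    exact absurd (pv_space_not_alpha c (by simpa using h)) (by simp [hc])
  have hsp_digit : ∀ c, PySem.Chars.isdigit c = true → PySem.Chars.isspace c = false := by
    intro c hc
    by_contra h
    exact absurd (pv_space_not_digit c (by simpa using h)) (by simp [hc])
  by_cases h : brand_name.toList.any PySem.Chars.isalpha = true
  · have hne : brand_name.toList.filter PySem.Chars.isalpha ≠ [] := by
      simp only [ne_eq, List.filter_eq_nil_iff]
      intro hall
      rcases List.any_eq_true.mp h with ⟨c, hc, hca⟩
      exact absurd hca (by simpa using hall c hc)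
    rw [if_pos (by simpa [List.length_pos_iff] using hne), if_pos h,
      pv_sorted_partition,
      pv_filter_keep_space _ PySem.Chars.isalpha,
      pv_filter_keep_other _ PySem.Chars.isalpha hsp_alpha]
  · have hnil : brand_name.toList.filter PySem.Chars.isalpha = [] := by
      refine List.filter_eq_nil_iff.mpr (fun c hc => ?_)
      simp only [Bool.not_eq_true]
      by_contra hca
      exact h (List.any_eq_true.mpr ⟨c, hc, by simpa using hca⟩)
    rw [if_neg (by simp [hnil]), if_neg h,
      pv_sorted_partition,
      pv_filter_keep_space _ PySem.Chars.isdigit,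
      pv_filter_keep_other _ PySem.Chars.isdigit hsp_digit]
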